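-- pv_equiv track=rewrite | github.com/SETT-Centre-Data-and-AI/Pteredactyl | src/pteredactyl/pteredactyl/regex_check_functions.py | is_nhs_number
-- ===== SOURCE A (Python) =====
-- def is_nhs_number(nhs_number: str | int) -> bool:
--     """
--     Check if a given value is a valid NHS number.
--
--     Args:
--         nhs_number (int | str): The NHS number to be checked.
--         Should be a string containing only numbers, (use of spaces and hyphens is permitted and will be processed).
--
--     Returns:
--         bool: True if the given value is a valid NHS number, otherwise False.
--
--     Example:
--         >>> is_nhs_number(1234567890)
--         True
--         >>> is_nhs_number("1234567890")
--         True
--         >>> is_nhs_number("1234567898")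
--         True # (fails checksum)
--         >>> is_nhs_number("12345")
--         False # (fails length check)
--
--     Note:
--         The NHS number is a 10-digit number used in the United Kingdom for healthcare identification.
--         The last digit of the NHS number is a check digit calculated by a special modules 11 algorithm for validation.
--     """
--
--     # Prepare NHS Number
--     nhs_number = (
--         str(nhs_number)
--         if isinstance(nhs_number, int)
--         else nhs_number.replace(" ", "").replace("-", "")
--     )
--
--     # Check Only Digits
--     if not nhs_number.isdigit():
--         return False
--
--     # Check Length
--     if len(nhs_number) != 10:
--         return False
--
--     # Check Checksum
--     total = 0
--     for i, digit in enumerate(nhs_number[0:-1]):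
--         position = i + 1
--         multiplier = 11 - position
--         total += int(digit) * multiplier
--
--     checksum = 11 - (total % 11)
--     checksum = 0 if checksum == 11 else checksum
--     check_digit = int(nhs_number[-1])
--
--     if checksum != check_digit or checksum == 10:
--         return False
--
--     # All checks passed
--     else:
--         return True
-- ===== SOURCE B (Python) =====
-- def is_nhs_number(nhs_number) -> bool:
--     # Same preprocessing as the original.
--     s = (
--         str(nhs_number)
--         if isinstance(nhs_number, int)
--         else nhs_number.replace(" ", "").replace("-", "")
--     )
--     if not s.isdigit():
--         return False
--     if len(s) != 10:
--         return False
--     # Fold the check digit (weight 1) into one weighted sum: valid iff total ≡ 0 (mod 11).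
--     total = sum(int(d) * (10 - i) for i, d in enumerate(s))
--     return total % 11 == 0
-- ===== Notes on version B (the rewrite author's own statement) =====
-- stated objective: simpler
-- what changed: B folds the check digit (weight 1) into a single weighted sum over all ten digits and tests divisibility by 11, replacing A's 11-(total%11) checksum computation, the ==11->0 fold, the explicit ==10 rejection and the final comparison branch.
import Mathlib
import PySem

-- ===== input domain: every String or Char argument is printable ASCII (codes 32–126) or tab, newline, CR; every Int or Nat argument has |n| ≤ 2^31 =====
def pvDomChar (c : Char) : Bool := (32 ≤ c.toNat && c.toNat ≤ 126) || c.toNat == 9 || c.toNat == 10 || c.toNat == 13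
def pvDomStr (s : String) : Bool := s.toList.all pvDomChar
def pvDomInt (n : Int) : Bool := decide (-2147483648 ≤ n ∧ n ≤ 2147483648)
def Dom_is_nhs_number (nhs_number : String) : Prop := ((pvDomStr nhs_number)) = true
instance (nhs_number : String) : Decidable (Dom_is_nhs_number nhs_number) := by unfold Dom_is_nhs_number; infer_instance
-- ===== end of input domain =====

-- B folds the check digit into one weighted sum and tests divisibility by 11,
-- replacing A's checksum computation and its branch chain; objective: simpler.


-- ===== PORT A =====
-- int(d) for a one-character string d; exact when d is an ASCII digit, which the
-- isdigit guard ensures at every call site.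
def pyDigitInt (d : Char) : Int := (d.toNat : Int) - 48

def is_nhs_number (nhs_number : String) : Bool :=
  -- Prepare NHS Number (String parameter: the isinstance(int) branch is not taken)
  let t := PySem.Chars.replace (PySem.Chars.replace nhs_number.toList [' '] []) ['-'] []
  -- Check Only Digits
  if ¬ PySem.Chars.strIsdigit t then false
  -- Check Length
  else if (PySem.Chars.len t : Int) ≠ 10 then false
  else
    -- Check Checksum
    let total := (PySem.List.enumerate (PySem.List.slice t none (some (-1)))).foldl
      (fun total p =>
        let position := p.1 + 1
        let multiplier := 11 - position
        total + pyDigitInt p.2 * multiplier) 0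
    let checksum := 11 - PySem.Int.mod total 11
    let checksum := if checksum = 11 then 0 else checksum
    -- t[-1]: t is nonempty here (length 10), so pyGet? is some; getD is never taken
    let check_digit := pyDigitInt ((PySem.List.pyGet? t (-1)).getD '0')
    if checksum ≠ check_digit ∨ checksum = 10 then false else true

-- ===== PORT B =====
def is_nhs_number_alt (nhs_number : String) : Bool :=
  let t := PySem.Chars.replace (PySem.Chars.replace nhs_number.toList [' '] []) ['-'] []
  if ¬ PySem.Chars.strIsdigit t then false
  else if (PySem.Chars.len t : Int) ≠ 10 then false
  else
    let total := ((PySem.List.enumerate t).map (fun p => pyDigitInt p.2 * (10 - p.1))).sum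
    PySem.Int.mod total 11 == 0

-- ===== PRECONDITION & SPEC =====
def Spec_is_nhs_number (nhs_number : String) (out : Bool) : Prop := out = is_nhs_number_alt nhs_number
instance (nhs_number : String) (out : Bool) : Decidable (Spec_is_nhs_number nhs_number out) := by unfold Spec_is_nhs_number; infer_instance

-- ===== CLAIM (what is proved, stated in full; the proofs are below) =====
def Claim_equal_is_nhs_number : Prop := ∀ (nhs_number : String), Dom_is_nhs_number nhs_number → Spec_is_nhs_number nhs_number (is_nhs_number nhs_number)

-- ===== LEMMAS AND PROOFS =====

-- an ASCII digit character has value 0..9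
theorem digit_bounds (c : Char) (h : PySem.Chars.isdigit c = true) :
    0 ≤ pyDigitInt c ∧ pyDigitInt c ≤ 9 := by
  simp [PySem.Chars.isdigit, Char.le_def, UInt32.le_iff_toNat_le] at h
  unfold pyDigitInt
  omega

-- ===== VERDICT (by name: the statement is the Claim_ definition above) =====
theorem is_nhs_number_spec : Claim_equal_is_nhs_number := by
  intro s _
  unfold Spec_is_nhs_number is_nhs_number is_nhs_number_alt
  generalize PySem.Chars.replace (PySem.Chars.replace s.toList [' '] []) ['-'] [] = t
  by_cases hd : PySem.Chars.strIsdigit t = true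
  case neg => simp [hd]
  by_cases hl : (PySem.Chars.len t : Int) = 10
  case neg =>
    have hne : ¬ ((t.length : Int) = 10) := by simpa using hl
    simp [hd, hne]
  have hlen : t.length = 10 := by
    have h10 : (t.length : Int) = 10 := by simpa using hl
    omega
  rcases t with _|⟨c0,_|⟨c1,_|⟨c2,_|⟨c3,_|⟨c4,_|⟨c5,_|⟨c6,_|⟨c7,_|⟨c8,_|⟨c9,rest⟩⟩⟩⟩⟩⟩⟩⟩⟩⟩ <;>
    simp only [List.length_cons, List.length_nil] at hlen <;> try omega
  obtain rfl : rest = [] := by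
    rcases rest with _|⟨x,xs⟩ <;> simp_all
  simp only [PySem.Chars.strIsdigit, List.all_cons, List.all_nil, Bool.and_eq_true,
    List.isEmpty_cons, Bool.not_false, Bool.true_and, Bool.and_true] at hd
  obtain ⟨h0, h1, h2, h3, h4, h5, h6, h7, h8, h9⟩ := hd
  obtain ⟨l0, u0⟩ := digit_bounds c0 h0
  obtain ⟨l1, u1⟩ := digit_bounds c1 h1
  obtain ⟨l2, u2⟩ := digit_bounds c2 h2
  obtain ⟨l3, u3⟩ := digit_bounds c3 h3
  obtain ⟨l4, u4⟩ := digit_bounds c4 h4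
  obtain ⟨l5, u5⟩ := digit_bounds c5 h5
  obtain ⟨l6, u6⟩ := digit_bounds c6 h6
  obtain ⟨l7, u7⟩ := digit_bounds c7 h7
  obtain ⟨l8, u8⟩ := digit_bounds c8 h8
  obtain ⟨l9, u9⟩ := digit_bounds c9 h9
  simp only [PySem.List.slice_to_neg_one, List.dropLast_cons₂, List.dropLast_singleton,
    PySem.List.enumerate_cons, PySem.List.enumerate_nil, List.foldl_cons, List.foldl_nil,
    List.map_cons, List.map_nil, List.sum_cons, List.sum_nil,
    PySem.List.pyGet?, PySem.List.pyIdx?]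
  have hD : PySem.Chars.strIsdigit [c0, c1, c2, c3, c4, c5, c6, c7, c8, c9] = true := by
    simp [PySem.Chars.strIsdigit, h0, h1, h2, h3, h4, h5, h6, h7, h8, h9]
  rw [PySem.Int.mod_eq_emod_of_pos (by norm_num), PySem.Int.mod_eq_emod_of_pos (by norm_num)]
  simp [hD]
  rw [Bool.eq_iff_iff]
  simp
  omega
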